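-- pv_equiv track=rewrite | github.com/jano31415/codejam | codeforces/728_round_div2/probc.py | solve
-- ===== SOURCE A (Python) =====
-- def solve(n, di):
--     tot = max(di)
--     # di.pop(0)
--     # if len(di) == 0:
--     #     return tot
--     di.sort()
--     right_sum = sum(di)
--     for i,d in enumerate(di):
--         right_sum -= d
--         # tot += left_sum - i*d
--         tot += (n-i-1)*d - right_sum
--         # left_sum+=d
--
--     return tot
-- ===== SOURCE B (Python) =====
-- def solve(n, di):
--     res = max(di) + (n - 1) * sum(di)
--     rest = list(di)
--     while rest:
--         x = rest.pop(0)
--         for y in rest: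
--             res -= 2 * max(x, y)
--     return res
-- ===== Notes on version B (the rewrite author's own statement) =====
-- stated objective: alternative
-- what changed: Removes the sort entirely: using the identity sum_i (n-1-2i)*d_(i) over the sorted list = (n-1)*sum(di) - 2*sum over unordered pairs of max(x,y), B computes the answer with a direct pairwise loop and never sorts (A sorts di in place; B leaves di unchanged).
import Mathlib
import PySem

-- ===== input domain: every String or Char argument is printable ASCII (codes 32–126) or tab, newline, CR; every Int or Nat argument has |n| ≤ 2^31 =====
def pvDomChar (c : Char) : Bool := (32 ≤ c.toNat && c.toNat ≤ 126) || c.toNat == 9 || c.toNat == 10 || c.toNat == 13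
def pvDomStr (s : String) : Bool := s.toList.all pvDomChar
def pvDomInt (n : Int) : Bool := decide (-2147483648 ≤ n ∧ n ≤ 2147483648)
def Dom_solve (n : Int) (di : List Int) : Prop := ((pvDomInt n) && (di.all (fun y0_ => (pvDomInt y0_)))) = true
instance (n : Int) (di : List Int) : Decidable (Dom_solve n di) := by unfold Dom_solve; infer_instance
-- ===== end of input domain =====

-- B drops the sort and computes the answer by a pairwise identity (alternative algorithm);
-- A sorts di in place, B does not mutate di: the equivalence proved is about the return value.

-- ===== PORT A =====
def solve (n : Int) (di : List Int) : Int :=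
  let tot := (PySem.List.max? di (fun x => x)).getD 0   -- max(di); Pre_solve excludes []
  let s := PySem.List.sorted di (fun x => x) false
  let st := (PySem.List.enumerate s 0).foldl
    (fun (st : Int × Int) (p : Int × Int) =>
      let rs := st.1 - p.2
      (rs, st.2 + (n - p.1 - 1) * p.2 - rs))
    (s.sum, tot)
  st.2

-- ===== PORT B =====
-- the 'while rest: x = rest.pop(0); for y in rest: res -= 2*max(x,y)' loop of Source B
def solveAltLoop : List Int → Int → Int
  | [], res => res
  | x :: rest, res => solveAltLoop rest (rest.foldl (fun r y => r - 2 * max x y) res)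

def solve_alt (n : Int) (di : List Int) : Int :=
  let res := (PySem.List.max? di (fun x => x)).getD 0 + (n - 1) * di.sum
  solveAltLoop di res

-- ===== PRECONDITION & SPEC =====
-- Pre_ excludes exactly the empty list, where A raises ValueError (max of empty sequence); B raises there too.
def Pre_solve (n : Int) (di : List Int) : Prop := di ≠ []
instance (n : Int) (di : List Int) : Decidable (Pre_solve n di) := by unfold Pre_solve; infer_instance
def pvWitness_solve : Int × List Int := (3, [5, 1, 4])

def Spec_solve (n : Int) (di : List Int) (out : Int) : Prop := out = solve_alt n di
instance (n : Int) (di : List Int) (out : Int) : Decidable (Spec_solve n di out) := by unfold Spec_solve; infer_instance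

-- ===== CLAIM (what is proved, stated in full; the proofs are below) =====
def Claim_equal_solve : Prop := ∀ (n : Int) (di : List Int), Dom_solve n di → Pre_solve n di → Spec_solve n di (solve n di)

-- ===== LEMMAS AND PROOFS =====

-- sum over unordered pairs of max, as Source B's loop computes it
def pairMaxSum : List Int → Int
  | [] => 0
  | x :: t => (t.map (fun y => max x y)).sum + pairMaxSum t

-- A's loop identity: the fold with running right_sum versus the weighted sum over enumerate.
theorem loop_eq (n : Int) : ∀ (l : List Int) (k rs t : Int),
    ((PySem.List.enumerate l k).foldl
      (fun (st : Int × Int) (p : Int × Int) =>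
        let rs := st.1 - p.2
        (rs, st.2 + (n - p.1 - 1) * p.2 - rs)) (rs, t)).2
    = t + ((PySem.List.enumerate l k).map (fun p => p.2 * (n - 1 - 2 * p.1))).sum
        + (k + l.length) * l.sum - l.length * rs := by
  intro l
  induction l with
  | nil => intro k rs t; simp [PySem.List.enumerate]
  | cons d l ih =>
    intro k rs t
    rw [PySem.List.enumerate_cons]
    simp only [List.foldl_cons, List.map_cons, List.sum_cons, List.length_cons, List.sum_cons]
    rw [ih (k + 1) (rs - d) (t + (n - k - 1) * d - (rs - d))]
    push_cast
    ring

-- the weighted sum splits into (n-1)*sum minus twice the index-weighted sum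
theorem weighted_split (n : Int) : ∀ (l : List Int) (k : Int),
    ((PySem.List.enumerate l k).map (fun p => p.2 * (n - 1 - 2 * p.1))).sum
      = (n - 1) * l.sum - 2 * ((PySem.List.enumerate l k).map (fun p => p.1 * p.2)).sum := by
  intro l
  induction l with
  | nil => intro k; simp [PySem.List.enumerate]
  | cons d l ih =>
    intro k
    rw [PySem.List.enumerate_cons]
    simp only [List.map_cons, List.sum_cons, List.sum_cons]
    rw [ih (k + 1)]
    ring

-- shifting the enumerate start adds k * sum
theorem idxsum_shift : ∀ (l : List Int) (k : Int),
    ((PySem.List.enumerate l k).map (fun p => p.1 * p.2)).sum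
      = ((PySem.List.enumerate l 0).map (fun p => p.1 * p.2)).sum + k * l.sum := by
  intro l
  induction l with
  | nil => intro k; simp [PySem.List.enumerate]
  | cons d l ih =>
    intro k
    rw [PySem.List.enumerate_cons, PySem.List.enumerate_cons]
    simp only [List.map_cons, List.sum_cons]
    rw [ih (k + 1), ih (0 + 1)]
    ring

-- Source B's inner 'for y in rest' loop
theorem inner_fold (x : Int) : ∀ (t : List Int) (res : Int),
    t.foldl (fun r y => r - 2 * max x y) res = res - 2 * (t.map (fun y => max x y)).sum := by
  intro t
  induction t with
  | nil => intro res; simp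
  | cons y t ih => intro res; simp only [List.foldl_cons, List.map_cons, List.sum_cons]; rw [ih]; ring

-- Source B's outer loop computes res - 2 * pairMaxSum
theorem loop_alt_eq : ∀ (l : List Int) (res : Int),
    solveAltLoop l res = res - 2 * pairMaxSum l := by
  intro l
  induction l with
  | nil => intro res; simp [solveAltLoop, pairMaxSum]
  | cons x t ih =>
    intro res
    simp only [solveAltLoop, pairMaxSum]
    rw [ih, inner_fold]
    ring

-- pairMaxSum is invariant under permutation (max is symmetric)
theorem pairMaxSum_perm : ∀ {l l' : List Int}, l.Perm l' → pairMaxSum l = pairMaxSum l' := by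
  intro l l' h
  induction h with
  | nil => rfl
  | cons x h ih =>
    simp only [pairMaxSum]
    rw [ih, (h.map (fun y => max x y)).sum_eq]
  | swap x y t =>
    simp only [pairMaxSum, List.map_cons, List.sum_cons]
    rw [max_comm]
    ring
  | trans _ _ ih₁ ih₂ => rw [ih₁, ih₂]

-- on a (·≤·)-sorted list, pairMaxSum is the index-weighted sum
theorem pairMaxSum_sorted : ∀ (s : List Int), s.Pairwise (fun a b => a ≤ b) →
    pairMaxSum s = ((PySem.List.enumerate s 0).map (fun p => p.1 * p.2)).sum := by
  intro s
  induction s with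
  | nil => intro _; simp [pairMaxSum, PySem.List.enumerate]
  | cons a t ih =>
    intro hp
    obtain ⟨ha, ht⟩ := List.pairwise_cons.mp hp
    rw [PySem.List.enumerate_cons]
    simp only [pairMaxSum, List.map_cons, List.sum_cons]
    rw [idxsum_shift t (0 + 1), ← ih ht]
    have hmap : t.map (fun y => max a y) = t.map id := by
      apply List.map_congr_left
      intro y hy
      simp [max_eq_right (ha y hy)]
    rw [hmap]
    simp
    ring

-- ===== VERDICT (by name: the statement is the Claim_ definition above) =====
theorem solve_spec : Claim_equal_solve := by
  intro n di _ hpre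
  unfold Spec_solve
  simp only [solve, solve_alt]
  set s := PySem.List.sorted di (fun x => x) false with hs
  have hperm : s.Perm di := PySem.List.sorted_perm di (fun x => x) false
  rw [loop_eq n s 0 s.sum ((PySem.List.max? di (fun x => x)).getD 0),
      weighted_split n s 0,
      ← pairMaxSum_sorted s (by simpa using PySem.List.sorted_pairwise di (fun x => x)),
      pairMaxSum_perm hperm,
      loop_alt_eq, hperm.sum_eq]
  ring
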